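-- pv_equiv track=rewrite | github.com/kgori/treeCl | treeCl/partition.py | _restricted_growth_notation
-- ===== SOURCE A (Python) =====
-- from collections import defaultdict
--
-- def _restricted_growth_notation(l):
--     """ The clustering returned by the hcluster module gives group
--     membership without regard for numerical order This function preserves
--     the group membership, but sorts the labelling into numerical order """
--
--     list_length = len(l)
--
--     d = defaultdict(list)
--     for (i, element) in enumerate(l):
--         d[element].append(i)
--
--     l2 = [None] * list_length
--
--     for (name, index_list) in enumerate(sorted(d.values(), key=min)):
--         for index in index_list:
--             l2[index] = name
--
--     return tuple(l2)
-- ===== SOURCE B (Python) =====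
-- def _restricted_growth_notation(l):
--     """Single pass: each distinct element gets the next label at its first
--     occurrence; later occurrences reuse it."""
--     labels = {}
--     out = []
--     for x in l:
--         if x not in labels:
--             labels[x] = len(labels)
--         out.append(labels[x])
--     return tuple(out)
-- ===== Notes on version B (the rewrite author's own statement) =====
-- stated objective: faster
-- what changed: Replaces group-by-value dict of index lists plus sort-by-min relabelling with a single pass that assigns the next label at each element's first occurrence.
import Mathlib
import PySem

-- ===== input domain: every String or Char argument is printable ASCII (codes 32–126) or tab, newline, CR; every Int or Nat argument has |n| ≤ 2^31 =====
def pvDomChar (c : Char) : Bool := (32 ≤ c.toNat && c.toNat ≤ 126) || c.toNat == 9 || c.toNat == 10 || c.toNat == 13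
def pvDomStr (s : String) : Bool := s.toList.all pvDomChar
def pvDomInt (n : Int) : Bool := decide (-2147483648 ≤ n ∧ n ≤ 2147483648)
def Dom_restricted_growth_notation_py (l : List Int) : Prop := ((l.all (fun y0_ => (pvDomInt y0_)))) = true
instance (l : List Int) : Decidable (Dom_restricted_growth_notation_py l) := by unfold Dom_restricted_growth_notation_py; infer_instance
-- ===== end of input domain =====

-- B replaces A's group-by-value dict of index lists plus sort-by-min relabelling with a
-- single pass that hands out the next label at each element's first occurrence (measured faster).

-- ===== PORT A =====
-- Literal port of _restricted_growth_notation: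
--   d = defaultdict(list); for i, element in enumerate(l): d[element].append(i)
--   l2 = [None]*len(l); for name, idxs in enumerate(sorted(d.values(), key=min)): for i in idxs: l2[i] = name
-- `min` of a group: the groups are nonempty, so `(min? …).getD 0` is Python's min (the default is never used);
-- the indices come from enumerate, hence are ≥ 0, so `.toNat` is exact; every cell of l2 is assigned,
-- so the final `.getD 0` (tuple of ints from the Option cells) is never the default either.
def restricted_growth_notation_py (l : List Int) : List Int :=
  let list_length := l.length
  let d : PySem.Dict Int (List Int) :=
    (PySem.List.enumerate l 0).foldl
      (fun d p => d.modify p.2 [] (fun xs => xs ++ [p.1])) PySem.Dict.empty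
  let l2 : List (Option Int) := List.replicate list_length none
  let l2 :=
    (PySem.List.enumerate
        (PySem.List.sorted d.values (fun ixs => (PySem.List.min? ixs (fun x => x)).getD 0)) 0).foldl
      (fun l2 p => p.2.foldl (fun l2 i => l2.set i.toNat (some p.1)) l2) l2
  l2.map (fun o => o.getD 0)

-- ===== PORT B =====
-- Literal port of Source B: one pass, labels[x] = len(labels) at x's first occurrence.
-- `labels.getD x 0`: the key x is always present at that point (Python's labels[x]).
def restricted_growth_notation_py_alt (l : List Int) : List Int :=
  (l.foldl
    (fun (st : PySem.Dict Int Int × List Int) x =>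
      let labels := if st.1.contains x then st.1 else st.1.insert x (st.1.size : Int)
      (labels, st.2 ++ [labels.getD x 0]))
    (PySem.Dict.empty, [])).2

-- ===== PRECONDITION & SPEC =====
def Spec_restricted_growth_notation_py (l : List Int) (out : List Int) : Prop := out = restricted_growth_notation_py_alt l
instance (l : List Int) (out : List Int) : Decidable (Spec_restricted_growth_notation_py l out) := by unfold Spec_restricted_growth_notation_py; infer_instance

-- ===== CLAIM (what is proved, stated in full; the proofs are below) =====
def Claim_equal_restricted_growth_notation_py : Prop := ∀ (l : List Int), Dom_restricted_growth_notation_py l → Spec_restricted_growth_notation_py l (restricted_growth_notation_py l)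

-- ===== LEMMAS AND PROOFS =====

-- Both programs compute `pvSpec l`: position j gets the rank of l[j] among the distinct
-- elements of l in first-occurrence order.
def pvRank (l : List Int) (x : Int) : Int := (List.idxOf x (PySem.Set.ofList l) : Int)

def pvSpec (l : List Int) : List Int := l.map (pvRank l)

-- ---- B = pvSpec ----

def pvAltFold (l : List Int) : PySem.Dict Int Int × List Int :=
  l.foldl
    (fun (st : PySem.Dict Int Int × List Int) x =>
      let labels := if st.1.contains x then st.1 else st.1.insert x (st.1.size : Int)
      (labels, st.2 ++ [labels.getD x 0]))
    (PySem.Dict.empty, [])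

lemma alt_eq_altFold (l : List Int) : restricted_growth_notation_py_alt l = (pvAltFold l).2 := rfl

lemma idxOf_append_left {x : Int} {s t : List Int} (h : x ∈ s) :
    List.idxOf x (s ++ t) = List.idxOf x s := List.idxOf_append_of_mem h

lemma pvAltFold_inv (l : List Int) :
    (pvAltFold l).1.keys = PySem.Set.ofList l ∧
    (∀ x ∈ PySem.Set.ofList l, (pvAltFold l).1.get? x = some (pvRank l x)) ∧
    (pvAltFold l).2 = pvSpec l := by
  induction l using List.reverseRecOn with
  | nil => refine ⟨rfl, ?_, rfl⟩; intro x hx; simp [PySem.Set.ofList] at hx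
  | append_singleton p x ih =>
    obtain ⟨hk, hg, ho⟩ := ih
    have hstep : pvAltFold (p ++ [x]) =
        (fun (st : PySem.Dict Int Int × List Int) x =>
          let labels := if st.1.contains x then st.1 else st.1.insert x (st.1.size : Int)
          (labels, st.2 ++ [labels.getD x 0])) (pvAltFold p) x := by
      unfold pvAltFold; rw [List.foldl_append]; rfl
    by_cases hc : (pvAltFold p).1.contains x = true
    · -- x seen before: set unchanged, labels unchanged
      have hxmem : x ∈ PySem.Set.ofList p := by
        rw [← hk]; exact (PySem.Dict.contains_iff_mem_keys _ _).mp hc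
      have hset : PySem.Set.ofList (p ++ [x]) = PySem.Set.ofList p := by
        rw [PySem.Set.ofList_append_singleton, PySem.Set.add_of_mem hxmem]
      have hrank : ∀ y, pvRank (p ++ [x]) y = pvRank p y := by
        intro y; unfold pvRank; rw [hset]
      rw [hstep]; simp only [hc, if_true]
      refine ⟨by simpa [hset] using hk, ?_, ?_⟩
      · intro y hy; rw [hset] at hy; rw [hrank]; exact hg y hy
      · unfold pvSpec
        rw [List.map_append]
        congr 1
        · rw [ho]; unfold pvSpec; exact List.map_congr_left (fun a _ => (hrank a).symm)
        · simp only [List.map_cons, List.map_nil]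
          rw [PySem.Dict.getD_eq_get?_getD, hg x hxmem, hrank]
          rfl
    · -- first occurrence of x: new label = current size
      have hc' : (pvAltFold p).1.contains x = false := by simpa using hc
      have hxnmem : x ∉ PySem.Set.ofList p := by
        rw [← hk]; intro hmem
        exact hc ((PySem.Dict.contains_iff_mem_keys _ _).mpr hmem)
      have hset : PySem.Set.ofList (p ++ [x]) = PySem.Set.ofList p ++ [x] := by
        rw [PySem.Set.ofList_append_singleton, PySem.Set.add_of_not_mem hxnmem]
      have hsize : ((pvAltFold p).1.size : Int) = ((PySem.Set.ofList p).length : Int) := by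
        have : (pvAltFold p).1.size = (pvAltFold p).1.keys.length := by
          simp [PySem.Dict.size, PySem.Dict.keys]
        rw [this, hk]
      have hrank_old : ∀ y ∈ PySem.Set.ofList p, pvRank (p ++ [x]) y = pvRank p y := by
        intro y hy; unfold pvRank; rw [hset, idxOf_append_left hy]
      have hrank_new : pvRank (p ++ [x]) x = ((PySem.Set.ofList p).length : Int) := by
        unfold pvRank
        rw [hset, List.idxOf_append]
        simp [hxnmem]
      rw [hstep]; simp only [hc', Bool.false_eq_true, if_false]
      refine ⟨?_, ?_, ?_⟩
      · rw [PySem.Dict.keys_insert_of_not_contains _ _ hc', hk, hset]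
      · intro y hy
        rw [hset] at hy
        rcases List.mem_append.mp hy with hy' | hy'
        · have hne : y ≠ x := fun h => hxnmem (h ▸ hy')
          rw [PySem.Dict.get?_insert, if_neg hne, hg y hy', hrank_old y hy']
        · have hyx : y = x := by simpa using hy'
          subst hyx
          rw [PySem.Dict.get?_insert, if_pos rfl, hsize, hrank_new]
      · unfold pvSpec
        rw [List.map_append]
        congr 1
        · rw [ho]; unfold pvSpec
          exact List.map_congr_left (fun a ha =>
            (hrank_old a ((PySem.Set.mem_ofList _ _).mpr ha)).symm)
        · simp only [List.map_cons, List.map_nil]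
          rw [PySem.Dict.getD_eq_get?_getD, PySem.Dict.get?_insert, if_pos rfl]
          rw [hrank_new, hsize]
          rfl

lemma alt_eq_spec (l : List Int) : restricted_growth_notation_py_alt l = pvSpec l := by
  rw [alt_eq_altFold]; exact (pvAltFold_inv l).2.2

-- ---- A = pvSpec ----

-- the list of indices (offset by s) at which k occurs in l, in increasing order
def pvIdxs (s : Int) (l : List Int) (k : Int) : List Int :=
  ((PySem.List.enumerate l s).filter (fun p => p.2 == k)).map (fun p => p.1)

lemma pvIdxs_cons (s x k : Int) (l : List Int) :
    pvIdxs s (x :: l) k = (if x = k then [s] else []) ++ pvIdxs (s + 1) l k := by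
  unfold pvIdxs
  rw [PySem.List.enumerate_cons, List.filter_cons]
  by_cases h : x = k <;> simp [h]

lemma mem_pvIdxs {i s k : Int} {l : List Int} :
    i ∈ pvIdxs s l k ↔ ∃ j : Nat, ∃ _ : j < l.length, i = s + j ∧ l[j] = k := by
  unfold pvIdxs
  constructor
  · intro h
    obtain ⟨p, hp, hp1⟩ := List.mem_map.mp h
    obtain ⟨hpe, hpk⟩ := List.mem_filter.mp hp
    obtain ⟨j, hj, hpj⟩ := (PySem.List.mem_enumerate_iff _ _ _).mp hpe
    refine ⟨j, hj, ?_, ?_⟩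
    · rw [← hp1, hpj]
    · have : p.2 = k := by simpa using hpk
      rw [hpj] at this; simpa using this
  · rintro ⟨j, hj, hi, hk⟩
    refine List.mem_map.mpr ⟨(s + j, l[j]), List.mem_filter.mpr ⟨?_, by simp [hk]⟩, hi.symm⟩
    exact (PySem.List.mem_enumerate_iff _ _ _).mpr ⟨j, hj, rfl⟩

lemma pvIdxs_nonneg {i k : Int} {l : List Int} (h : i ∈ pvIdxs 0 l k) : 0 ≤ i := by
  obtain ⟨j, _, hi, _⟩ := mem_pvIdxs.mp h
  omega

lemma pvIdxs_pairwise (s k : Int) (l : List Int) :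
    (pvIdxs s l k).Pairwise (· < ·) := by
  unfold pvIdxs
  exact ((PySem.List.pairwise_lt_enumerate l s).sublist List.filter_sublist).map _
    (fun _ _ h => h)

lemma pvIdxs_head {k : Int} {l : List Int} (h : k ∈ l) (s : Int) :
    ∃ t, pvIdxs s l k = (s + (List.idxOf k l : Int)) :: t := by
  induction l generalizing s with
  | nil => cases h
  | cons x l ih =>
    rw [pvIdxs_cons]
    by_cases hx : x = k
    · subst hx
      exact ⟨pvIdxs (s + 1) l x, by simp [List.idxOf_cons_self]⟩
    · have hk : k ∈ l := by
        rcases List.mem_cons.mp h with h' | h'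
        · exact absurd h'.symm hx
        · exact h'
      obtain ⟨t, ht⟩ := ih hk (s + 1)
      refine ⟨t, ?_⟩
      rw [if_neg hx, List.nil_append, ht, List.idxOf_cons_ne _ (fun h' => hx h')]
      congr 1
      push_cast
      ring

lemma foldl_min_of_le {x : Int} {t : List Int} (h : ∀ y ∈ t, x ≤ y) :
    t.foldl min x = x := by
  induction t with
  | nil => rfl
  | cons y t ih =>
    rw [List.foldl_cons, min_eq_left (h y (List.mem_cons_self ..))]
    exact ih (fun z hz => h z (List.mem_cons_of_mem _ hz))

lemma pvIdxs_key {k : Int} {l : List Int} (h : k ∈ l) :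
    (PySem.List.min? (pvIdxs 0 l k) (fun x => x)).getD 0 = (List.idxOf k l : Int) := by
  obtain ⟨t, ht⟩ := pvIdxs_head h 0
  have hpw := pvIdxs_pairwise 0 k l
  rw [ht] at hpw ⊢
  rw [PySem.List.min?_id_cons, foldl_min_of_le (fun y hy => le_of_lt ((List.pairwise_cons.mp hpw).1 y hy))]
  simp

-- the dict built by A's first loop
def pvDictA (l : List Int) : PySem.Dict Int (List Int) :=
  (PySem.List.enumerate l 0).foldl
    (fun d p => d.modify p.2 [] (fun xs => xs ++ [p.1])) PySem.Dict.empty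

lemma pvDictA_keys (l : List Int) : (pvDictA l).keys = PySem.Set.ofList l := by
  unfold pvDictA
  rw [PySem.Dict.keys_foldl_modify_key (PySem.List.enumerate l 0) (fun p => p.2) []
    (fun _ p => (fun xs => xs ++ [p.1])) PySem.Dict.empty]
  rw [PySem.List.map_snd_enumerate]
  simp [PySem.Set.update_nil_left]

lemma pvDictA_keys_nodup (l : List Int) : (pvDictA l).keys.Nodup := by
  unfold pvDictA
  exact PySem.Dict.nodup_keys_foldl_modify_key (PySem.List.enumerate l 0) (fun p => p.2) []
    (fun _ p => (fun xs => xs ++ [p.1])) PySem.Dict.empty (by simp)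

lemma pvDictA_getD (l : List Int) (k : Int) : (pvDictA l).getD k [] = pvIdxs 0 l k := by
  unfold pvDictA
  have hmap : (List.foldl (fun d p => d.modify p.2 [] (fun xs => xs ++ [p.1]))
        PySem.Dict.empty (PySem.List.enumerate l 0)) =
      (List.foldl (fun d p => d.modify p.1 [] (fun xs => xs ++ [p.2]))
        PySem.Dict.empty ((PySem.List.enumerate l 0).map (fun p => (p.2, p.1)))) := by
    rw [List.foldl_map]
  rw [hmap]
  rw [PySem.Dict.getD_foldl_modify_append]
  rw [List.filter_map, List.map_map]
  unfold pvIdxs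
  simp [Function.comp_def]

lemma pvDictA_values (l : List Int) :
    (pvDictA l).values = (PySem.Set.ofList l).map (fun k => pvIdxs 0 l k) := by
  rw [PySem.Dict.values_eq_map_keys (pvDictA l) (pvDictA_keys_nodup l) []]
  rw [pvDictA_keys]
  exact List.map_congr_left (fun k _ => pvDictA_getD l k)

-- first-occurrence order: the distinct elements of l, in set(l)-order, have increasing first index
lemma ofList_pairwise_idxOf (l : List Int) :
    (PySem.Set.ofList l).Pairwise (fun a b => List.idxOf a l < List.idxOf b l) := by
  induction l with
  | nil => simp [PySem.Set.ofList]
  | cons x l ih =>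
    rw [PySem.Set.ofList_cons, List.pairwise_cons]
    constructor
    · intro b hb
      have hbx : b ≠ x := ((PySem.Set.mem_discard ..).mp hb).2
      rw [List.idxOf_cons_self, List.idxOf_cons_ne _ (fun h => hbx h.symm)]
      exact Nat.succ_pos _
    · have hsub : ((PySem.Set.ofList l).discard x).Sublist (PySem.Set.ofList l) := by
        unfold PySem.Set.discard; exact List.filter_sublist
      have hd := ih.sublist hsub
      refine hd.imp_of_mem ?_
      intro a b ha hb hab
      have hax : a ≠ x := ((PySem.Set.mem_discard ..).mp ha).2
      have hbx : b ≠ x := ((PySem.Set.mem_discard ..).mp hb).2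
      rw [List.idxOf_cons_ne _ (fun h => hax h.symm), List.idxOf_cons_ne _ (fun h => hbx h.symm)]
      exact Nat.succ_lt_succ hab

lemma sorted_values_eq (l : List Int) :
    PySem.List.sorted (pvDictA l).values
      (fun ixs => (PySem.List.min? ixs (fun x => x)).getD 0) = (pvDictA l).values := by
  apply PySem.List.sorted_eq_self_of_pairwise
  rw [pvDictA_values]
  rw [List.pairwise_map]
  refine (ofList_pairwise_idxOf l).imp_of_mem ?_
  intro a b ha hb hab
  have ha' : a ∈ l := (PySem.Set.mem_ofList _ _).mp ha
  have hb' : b ∈ l := (PySem.Set.mem_ofList _ _).mp hb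
  rw [pvIdxs_key ha', pvIdxs_key hb']
  exact_mod_cast le_of_lt hab

-- the filling loops
lemma fill1_len (ixs : List Int) (v : Int) :
    ∀ acc : List (Option Int),
      (ixs.foldl (fun l2 i => l2.set i.toNat (some v)) acc).length = acc.length := by
  induction ixs with
  | nil => intro acc; rfl
  | cons i t ih => intro acc; rw [List.foldl_cons, ih]; exact List.length_set ..

lemma fill1_getElem? (ixs : List Int) (v : Int) :
    ∀ (acc : List (Option Int)) (j : Nat), (∀ i ∈ ixs, 0 ≤ i) → j < acc.length →
      (ixs.foldl (fun l2 i => l2.set i.toNat (some v)) acc)[j]? =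
        if (j : Int) ∈ ixs then some (some v) else acc[j]? := by
  induction ixs with
  | nil => intro acc j _ _; simp
  | cons i t ih =>
    intro acc j hpos hj
    rw [List.foldl_cons,
      ih _ j (fun i hi => hpos i (List.mem_cons_of_mem _ hi)) (by rw [List.length_set]; exact hj)]
    by_cases hm : (j : Int) ∈ t
    · simp [hm]
    · have h0 : 0 ≤ i := hpos i (List.mem_cons_self ..)
      rw [if_neg hm, List.getElem?_set]
      by_cases hij : i = (j : Int)
      · have htn : i.toNat = j := by omega
        rw [if_pos htn, if_pos (show i.toNat < acc.length by rw [htn]; exact hj),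
          if_pos (List.mem_cons.mpr (Or.inl hij.symm))]
      · have hne : i.toNat ≠ j := by omega
        rw [if_neg hne,
          if_neg (show ¬((j : Int) ∈ i :: t) from by
            rw [List.mem_cons]; rintro (h | h); exacts [hij h.symm, hm h])]

lemma fillO_len (gs : List (Int × List Int)) :
    ∀ acc : List (Option Int),
      (gs.foldl (fun l2 p => p.2.foldl (fun l2 i => l2.set i.toNat (some p.1)) l2) acc).length =
        acc.length := by
  induction gs with
  | nil => intro acc; rfl
  | cons g gs ih => intro acc; rw [List.foldl_cons, ih, fill1_len]

lemma fillO_getElem? (l : List Int) (ks : List Int) :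
    ∀ (s : Int) (acc : List (Option Int)) (j : Nat), ks.Nodup → acc.length = l.length →
      ∀ hj : j < l.length,
      ((PySem.List.enumerate (ks.map (fun k => pvIdxs 0 l k)) s).foldl
          (fun l2 p => p.2.foldl (fun l2 i => l2.set i.toNat (some p.1)) l2) acc)[j]? =
        if l[j] ∈ ks then some (some (s + (List.idxOf l[j] ks : Int))) else acc[j]? := by
  induction ks with
  | nil => intro s acc j _ _ hj; simp
  | cons k ks ih =>
    intro s acc j hnd hlen hj
    rw [List.map_cons, PySem.List.enumerate_cons, List.foldl_cons]
    have hlen' : ((pvIdxs 0 l k).foldl (fun l2 i => l2.set i.toNat (some s)) acc).length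
        = l.length := by rw [fill1_len]; exact hlen
    rw [ih (s + 1) _ j (List.nodup_cons.mp hnd).2 hlen' hj]
    have hacc' := fill1_getElem? (pvIdxs 0 l k) s acc j
      (fun i hi => pvIdxs_nonneg hi) (by rw [hlen]; exact hj)
    by_cases hlk : l[j] = k
    · have hnin : l[j] ∉ ks := by rw [hlk]; exact (List.nodup_cons.mp hnd).1
      rw [if_neg hnin, hacc']
      have hjmem : (j : Int) ∈ pvIdxs 0 l k := mem_pvIdxs.mpr ⟨j, hj, by simp, hlk⟩
      rw [if_pos hjmem, if_pos (List.mem_cons.mpr (Or.inl hlk))]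
      rw [hlk, List.idxOf_cons_self]
      simp
    · have hjnmem : (j : Int) ∉ pvIdxs 0 l k := by
        intro hmem
        obtain ⟨j', hj', hi, hk'⟩ := mem_pvIdxs.mp hmem
        have : j' = j := by omega
        subst this
        exact hlk hk'
      rw [hacc', if_neg hjnmem]
      by_cases hin : l[j] ∈ ks
      · rw [if_pos hin, if_pos (List.mem_cons.mpr (Or.inr hin))]
        rw [List.idxOf_cons_ne _ (fun h => hlk h.symm)]
        push_cast
        ring_nf
      · rw [if_neg hin, if_neg (by simp [List.mem_cons, hlk, hin])]

lemma a_eq_spec (l : List Int) : restricted_growth_notation_py l = pvSpec l := by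
  have hred : restricted_growth_notation_py l =
      ((PySem.List.enumerate
          (PySem.List.sorted (pvDictA l).values
            (fun ixs => (PySem.List.min? ixs (fun x => x)).getD 0)) 0).foldl
        (fun l2 p => p.2.foldl (fun l2 i => l2.set i.toNat (some p.1)) l2)
        (List.replicate l.length none)).map (fun o => o.getD 0) := rfl
  rw [hred, sorted_values_eq, pvDictA_values]
  apply List.ext_getElem?
  intro j
  by_cases hj : j < l.length
  · rw [List.getElem?_map,
      fillO_getElem? l (PySem.Set.ofList l) 0 (List.replicate l.length none) j
        (PySem.Set.nodup_ofList l) (List.length_replicate ..) hj]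
    have hmem : l[j] ∈ PySem.Set.ofList l :=
      (PySem.Set.mem_ofList _ _).mpr (List.getElem_mem hj)
    rw [if_pos hmem]
    unfold pvSpec pvRank
    rw [List.getElem?_map, List.getElem?_eq_getElem hj]
    simp
  · have h1 : ((PySem.List.enumerate ((PySem.Set.ofList l).map (fun k => pvIdxs 0 l k)) 0).foldl
        (fun l2 p => p.2.foldl (fun l2 i => l2.set i.toNat (some p.1)) l2)
        (List.replicate l.length none)).length = l.length := by
      rw [fillO_len, List.length_replicate]
    rw [List.getElem?_eq_none (by rw [List.length_map, h1]; omega),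
      List.getElem?_eq_none (by unfold pvSpec; rw [List.length_map]; omega)]

-- ===== VERDICT (by name: the statement is the Claim_ definition above) =====
theorem restricted_growth_notation_py_spec : Claim_equal_restricted_growth_notation_py := by
  intro l _
  unfold Spec_restricted_growth_notation_py
  rw [a_eq_spec, alt_eq_spec]
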